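-- pv_equiv track=rewrite | github.com/rafaellpaula/k-path-graphs-toolkit | src/generators.py | nomalizado
-- ===== SOURCE A (Python) =====
-- def nomalizado(sequencia: list[int]):
--     if sequencia[0] == 1:
--         for i in range(1, len(sequencia)):
--             if sequencia[i] <= 1 + max(sequencia[:i]):
--                 pass
--             else:
--                 return False
--         return True
--     else:
--         return False
-- ===== SOURCE B (Python) =====
-- def nomalizado(sequencia: list[int]):
--     if sequencia[0] != 1:
--         return False
--     m = sequencia[0]
--     for x in sequencia[1:]:
--         if x > m + 1:
--             return False
--         if x > m:
--             m = x
--     return True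
-- ===== Notes on version B (the rewrite author's own statement) =====
-- stated objective: alternative
-- what changed: B keeps a running maximum updated in one pass instead of recomputing the prefix maximum from scratch at every index, so the inner prefix scan disappears.
import Mathlib
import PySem

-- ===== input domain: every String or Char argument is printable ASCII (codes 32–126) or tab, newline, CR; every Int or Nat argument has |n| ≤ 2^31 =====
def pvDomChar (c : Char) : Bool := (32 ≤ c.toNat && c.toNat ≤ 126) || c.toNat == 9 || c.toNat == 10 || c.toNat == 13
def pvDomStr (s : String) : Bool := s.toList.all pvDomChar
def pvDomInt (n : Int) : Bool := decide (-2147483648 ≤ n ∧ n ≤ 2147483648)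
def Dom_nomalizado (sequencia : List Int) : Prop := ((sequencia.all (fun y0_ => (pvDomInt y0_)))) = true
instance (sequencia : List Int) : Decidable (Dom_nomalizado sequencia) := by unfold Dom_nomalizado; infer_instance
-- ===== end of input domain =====

-- B replaces A's per-index prefix re-scan by a single pass with a running maximum (alternative algorithm); both read the first element, so the empty list (IndexError in A and B) is outside Pre_.

-- ===== PORT A =====
-- the 'for i in range(1, len(sequencia))' loop with early return, as index recursion
def nomalizadoLoop (sequencia : List Int) (i : Nat) : Bool :=
  if h : i < sequencia.length then
    if (PySem.List.pyGet? sequencia (i : Int)).getD 0 ≤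
        1 + ((PySem.List.max? (PySem.List.slice sequencia (some 0) (some (i : Int))) (fun y => y)).getD 0) then
      nomalizadoLoop sequencia (i + 1)
    else false
  else true
termination_by sequencia.length - i

def nomalizado (sequencia : List Int) : Bool :=
  if (PySem.List.pyGet? sequencia 0).getD 0 = 1 then
    nomalizadoLoop sequencia 1
  else false

-- ===== PORT B =====
-- the 'for x in sequencia[1:]' loop with running maximum m
def altLoop (m : Int) : List Int → Bool
  | [] => true
  | x :: xs => if x > m + 1 then false else altLoop (if x > m then x else m) xs

def nomalizado_alt (sequencia : List Int) : Bool :=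
  if (PySem.List.pyGet? sequencia 0).getD 0 ≠ 1 then false
  else altLoop ((PySem.List.pyGet? sequencia 0).getD 0) (PySem.List.slice sequencia (some 1) none)

-- ===== PRECONDITION & SPEC =====
-- Pre_ excludes only the empty list, on which both Pythons raise IndexError at sequencia[0]
def Pre_nomalizado (sequencia : List Int) : Prop := sequencia ≠ []
instance (sequencia : List Int) : Decidable (Pre_nomalizado sequencia) := by unfold Pre_nomalizado; infer_instance
def pvWitness_nomalizado : List Int := ([1, 2, 2, 3])

def Spec_nomalizado (sequencia : List Int) (out : Bool) : Prop := out = nomalizado_alt sequencia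
instance (sequencia : List Int) (out : Bool) : Decidable (Spec_nomalizado sequencia out) := by unfold Spec_nomalizado; infer_instance

-- ===== CLAIM (what is proved, stated in full; the proofs are below) =====
def Claim_equal_nomalizado : Prop := ∀ (sequencia : List Int), Dom_nomalizado sequencia → Pre_nomalizado sequencia → Spec_nomalizado sequencia (nomalizado sequencia)

-- ===== LEMMAS AND PROOFS =====

lemma foldl_max_append_singleton (x y : Int) (l : List Int) :
    (l ++ [y]).foldl max x = max (l.foldl max x) y := by
  simp [List.foldl_append]

lemma loop_eq (x : Int) (rest : List Int) :
    ∀ i : Nat, nomalizadoLoop (x :: rest) (i + 1) = altLoop ((rest.take i).foldl max x) (rest.drop i) := by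
  intro i
  induction hn : rest.length - i generalizing i with
  | zero =>
    have hle : rest.length ≤ i := by omega
    rw [nomalizadoLoop]
    simp [List.drop_eq_nil_of_le hle, altLoop, not_le.mpr (lt_of_le_of_lt hle (Nat.lt_succ_self i))]
  | succ n ih =>
    have hi : i < rest.length := by omega
    have hdrop : rest.drop i = rest[i] :: rest.drop (i + 1) := List.drop_eq_getElem_cons hi
    rw [nomalizadoLoop]
    have hlt : i + 1 < (x :: rest).length := by simp; omega
    have hget : (PySem.List.pyGet? (x :: rest) ((i + 1 : Nat) : Int)).getD 0 = rest[i] := by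
      rw [PySem.List.pyGet?_natCast]
      simp [List.getElem?_cons_succ, List.getElem?_eq_getElem hi]
    have hslice : PySem.List.slice (x :: rest) (some 0) (some ((i + 1 : Nat) : Int)) = x :: rest.take i := by
      rw [PySem.List.slice_zero_start, PySem.List.slice_to_natCast]
      simp
    have hmax : (PySem.List.max? (x :: rest.take i) (fun y => y)).getD 0 = (rest.take i).foldl max x := by
      rw [PySem.List.max?_id_cons]; rfl
    rw [dif_pos hlt, hget, hslice, hmax, hdrop]
    set m := (rest.take i).foldl max x with hm
    by_cases hc : rest[i] ≤ 1 + m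
    · rw [if_pos hc]
      have htake : rest.take (i + 1) = rest.take i ++ [rest[i]] := by
        rw [List.take_add_one, List.getElem?_eq_getElem hi]; rfl
      have hnext : (rest.take (i + 1)).foldl max x = if rest[i] > m then rest[i] else m := by
        rw [htake, foldl_max_append_singleton, ← hm]
        by_cases h1 : rest[i] ≤ m
        · rw [if_neg (by omega), max_eq_left h1]
        · rw [if_pos (by omega), max_eq_right (by omega)]
      rw [ih (i + 1) (by omega), hnext]
      have hng : ¬ rest[i] > m + 1 := by omega
      simp [altLoop, hng]
    · rw [if_neg hc]
      simp [altLoop]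
      omega

-- ===== VERDICT (by name: the statement is the Claim_ definition above) =====
theorem nomalizado_spec : Claim_equal_nomalizado := by
  intro sequencia _ hpre
  unfold Spec_nomalizado
  match sequencia with
  | [] => exact absurd rfl hpre
  | x :: rest =>
    unfold nomalizado nomalizado_alt
    rw [PySem.List.slice_from_one]
    simp only [PySem.List.pyGet?_zero_cons, Option.getD_some, List.tail_cons]
    by_cases hx : x = 1
    · rw [if_pos hx, if_neg (by simp [hx])]
      have := loop_eq x rest 0
      simpa using this
    · rw [if_neg hx, if_pos (by simp [hx])]
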